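-- pv_equiv track=rewrite | github.com/matthew-bowker/autodact | src/pipeline/column_detector.py | _find_name_groups
-- ===== SOURCE A (Python) =====
-- def _find_name_groups(column_mapping: dict[int, str]) -> list[list[int]]:
--     """Return groups of adjacent column indices all mapped to NAME."""
--     name_cols = sorted(ci for ci, cat in column_mapping.items() if cat == "NAME")
--     if not name_cols:
--         return []
--
--     groups: list[list[int]] = [[name_cols[0]]]
--     for col in name_cols[1:]:
--         if col == groups[-1][-1] + 1:
--             groups[-1].append(col)
--         else:
--             groups.append([col])
--     return groups
-- ===== SOURCE B (Python) =====
-- def _run_from(start, names):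
--     run = []
--     c = start
--     while c in names:
--         run.append(c)
--         c += 1
--     return run
--
--
-- def _find_name_groups(column_mapping: dict[int, str]) -> list[list[int]]:
--     """Return groups of adjacent column indices all mapped to NAME."""
--     names = {ci for ci, cat in column_mapping.items() if cat == "NAME"}
--     return [
--         _run_from(start, names)
--         for start in sorted(names)
--         if start - 1 not in names
--     ]
-- ===== Notes on version B (the rewrite author's own statement) =====
-- stated objective: alternative
-- what changed: Replaced the sort-then-single-pass grouping with a running boundary by a hash-set algorithm: build the set of NAME columns once, identify group starts as sorted members whose predecessor is not in the set, and expand each start forward by set-membership tests (c, c+1, c+2, ...) until the run leaves the set.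
import Mathlib
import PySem

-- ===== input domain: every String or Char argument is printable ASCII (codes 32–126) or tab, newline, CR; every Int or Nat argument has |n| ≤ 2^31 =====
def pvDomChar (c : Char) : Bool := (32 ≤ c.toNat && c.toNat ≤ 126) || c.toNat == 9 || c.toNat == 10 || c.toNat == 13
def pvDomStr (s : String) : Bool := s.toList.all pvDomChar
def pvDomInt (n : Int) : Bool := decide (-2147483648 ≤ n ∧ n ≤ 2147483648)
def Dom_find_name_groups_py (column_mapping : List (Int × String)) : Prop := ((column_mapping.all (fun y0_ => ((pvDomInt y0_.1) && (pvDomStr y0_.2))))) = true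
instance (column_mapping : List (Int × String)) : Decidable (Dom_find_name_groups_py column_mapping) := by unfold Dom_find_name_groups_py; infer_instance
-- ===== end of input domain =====

-- B replaces A's sort-then-running-boundary loop by a hash-set algorithm: group starts are
-- NAME columns whose predecessor is not in the set; each run is expanded by membership tests. Same cost.


-- ===== PORT A =====
-- one loop step of A: compare col with groups[-1][-1] + 1, append in place or start a new group
def pvStepA (groups : List (List Int)) (col : Int) : List (List Int) :=
  match groups.getLast? with
  | some g =>
    match g.getLast? with
    | some last =>
      if col = last + 1 then groups.dropLast ++ [g ++ [col]]
      else groups ++ [[col]]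
    | none => groups ++ [[col]]
  | none => groups ++ [[col]]

def find_name_groups_py (column_mapping : List (Int × String)) : List (List Int) :=
  let name_cols :=
    PySem.List.sorted
      (((PySem.Dict.ofList column_mapping).items.filter (fun p => p.2 == "NAME")).map (·.1))
      (fun x => x) false
  match name_cols with
  | [] => []
  | c0 :: rest => rest.foldl pvStepA [[c0]]

-- ===== PORT B =====
-- port of _run_from's while loop; the fuel (names.length + 1 at the call site) is only a
-- totality guard: the loop visits distinct members of names in increasing order, so it
-- performs at most names.length successful membership tests
def pvRun : Nat → Int → List Int → List Int
  | 0, _, _ => []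
  | fuel + 1, c, names =>
    if PySem.Set.contains names c then c :: pvRun fuel (c + 1) names else []

def find_name_groups_py_alt (column_mapping : List (Int × String)) : List (List Int) :=
  let names : PySem.Set Int :=
    PySem.Set.ofList
      (((PySem.Dict.ofList column_mapping).items.filter (fun p => p.2 == "NAME")).map (·.1))
  ((PySem.List.sorted names (fun x => x) false).filter
      (fun start => !(PySem.Set.contains names (start - 1)))).map
    (fun start => pvRun (names.length + 1) start names)

-- ===== PRECONDITION & SPEC =====
def Spec_find_name_groups_py (column_mapping : List (Int × String)) (out : List (List Int)) : Prop := out = find_name_groups_py_alt column_mapping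
instance (column_mapping : List (Int × String)) (out : List (List Int)) : Decidable (Spec_find_name_groups_py column_mapping out) := by unfold Spec_find_name_groups_py; infer_instance

-- ===== CLAIM (what is proved, stated in full; the proofs are below) =====
def Claim_equal_find_name_groups_py : Prop := ∀ (column_mapping : List (Int × String)), Dom_find_name_groups_py column_mapping → Spec_find_name_groups_py column_mapping (find_name_groups_py column_mapping)

-- ===== LEMMAS AND PROOFS =====

-- the common reference: pvChunk x xs = the adjacency grouping of (x :: xs)
def pvChunk (x : Int) : List Int → List (List Int)
  | [] => [[x]]
  | y :: ys =>
    match pvChunk y ys with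
    | g :: gs => if y = x + 1 then (x :: g) :: gs else [x] :: g :: gs
    | [] => [[x]]

def pvChunkAll : List Int → List (List Int)
  | [] => []
  | x :: xs => pvChunk x xs

theorem pvChunk_head (x : Int) (xs : List Int) :
    ∃ g gs, pvChunk x xs = (x :: g) :: gs := by
  induction xs generalizing x with
  | nil => exact ⟨[], [], rfl⟩
  | cons y ys ih =>
    obtain ⟨g, gs, h⟩ := ih y
    by_cases hy : y = x + 1
    · subst hy
      exact ⟨(x + 1) :: g, gs, by simp [pvChunk, h]⟩
    · exact ⟨[], (y :: g) :: gs, by simp [pvChunk, h, hy]⟩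

-- ---- A's loop equals pvChunk ----
-- A's loop, re-expressed as structural recursion on the remaining input,
-- carrying the current group as (already-fixed part, its last element)
def pvGlue (g : List Int) (last : Int) : List Int → List (List Int)
  | [] => [g ++ [last]]
  | x :: rest =>
    if x = last + 1 then pvGlue (g ++ [last]) x rest
    else (g ++ [last]) :: pvGlue [] x rest

theorem pvGlue_eq_chunk (xs : List Int) :
    ∀ (g : List Int) (x : Int),
      pvGlue g x xs =
        match pvChunk x xs with
        | h :: t => (g ++ h) :: t
        | [] => [g ++ [x]] := by
  induction xs with
  | nil => intro g x; simp [pvGlue, pvChunk]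
  | cons y rest ih =>
    intro g x
    obtain ⟨g', gs', hc⟩ := pvChunk_head y rest
    by_cases hy : y = x + 1
    · have hl : pvGlue g x (y :: rest) = pvGlue (g ++ [x]) y rest := by
        simp [pvGlue, hy]
      subst hy
      rw [hl, ih (g ++ [x]) (x + 1)]
      simp [pvChunk, hc]
    · have hl : pvGlue g x (y :: rest) = (g ++ [x]) :: pvGlue [] y rest := by
        simp [pvGlue, hy]
      rw [hl, ih [] y]
      simp [pvChunk, hc, hy]

theorem pvFoldl_stepA (xs : List Int) :
    ∀ (gs : List (List Int)) (g : List Int) (last : Int),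
      xs.foldl pvStepA (gs ++ [g ++ [last]]) = gs ++ pvGlue g last xs := by
  induction xs with
  | nil => intro gs g last; simp [pvGlue]
  | cons x rest ih =>
    intro gs g last
    have hstep : pvStepA (gs ++ [g ++ [last]]) x =
        if x = last + 1 then gs ++ [(g ++ [last]) ++ [x]]
        else (gs ++ [g ++ [last]]) ++ [[x]] := by
      simp only [pvStepA, List.getLast?_concat]
      split <;> simp
    rw [List.foldl_cons, hstep]
    by_cases hx : x = last + 1
    · rw [if_pos hx, ih gs (g ++ [last]) x]
      simp [pvGlue, hx]
    · rw [if_neg hx]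
      have h1 := ih (gs ++ [g ++ [last]]) [] x
      simp only [List.nil_append] at h1
      rw [h1]
      simp [pvGlue, hx]

theorem pvA_eq_chunk (c : Int) (rest : List Int) :
    rest.foldl pvStepA [[c]] = pvChunk c rest := by
  have h := pvFoldl_stepA rest [] [] c
  simp only [List.nil_append] at h
  rw [h, pvGlue_eq_chunk rest [] c]
  obtain ⟨g, gs, hc⟩ := pvChunk_head c rest
  simp [hc]

-- ---- B's run expansion equals pvChunk ----

theorem pvContains_eq (s : List Int) (c : Int) :
    PySem.Set.contains s c = decide (c ∈ s) := by
  have h := PySem.Set.contains_iff (s := s) (x := c)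
  cases hb : PySem.Set.contains s c <;> simp_all

theorem pvRun_succ (f : Nat) (c : Int) (s : List Int) :
    pvRun (f + 1) c s = if c ∈ s then c :: pvRun f (c + 1) s else [] := by
  simp [pvRun]

theorem pvRun_of_not_mem (f : Nat) (c : Int) (s : List Int) (h : c ∉ s) :
    pvRun f c s = [] := by
  cases f with
  | zero => rfl
  | succ f => rw [pvRun_succ, if_neg h]

theorem pvRun_congr_mem (t s : List Int) (h : ∀ z : Int, z ∈ t ↔ z ∈ s) :
    ∀ (f : Nat) (c : Int), pvRun f c t = pvRun f c s := by
  intro f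
  induction f with
  | zero => intro c; rfl
  | succ f ih =>
    intro c
    rw [pvRun_succ, pvRun_succ, ih (c + 1)]
    by_cases hc : c ∈ t
    · rw [if_pos hc, if_pos ((h c).mp hc)]
    · rw [if_neg hc, if_neg (fun hs => hc ((h c).mpr hs))]

theorem pvRun_cons_gt (x : Int) (xs : List Int) :
    ∀ (f : Nat) (c : Int), x < c → pvRun f c (x :: xs) = pvRun f c xs := by
  intro f
  induction f with
  | zero => intro c _; rfl
  | succ f ih =>
    intro c hc
    rw [pvRun_succ, pvRun_succ, ih (c + 1) (by omega)]
    have : (c ∈ x :: xs) ↔ c ∈ xs := by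
      constructor
      · intro h; rcases List.mem_cons.mp h with h | h
        · omega
        · exact h
      · exact fun h => List.mem_cons_of_mem _ h
    by_cases hm : c ∈ xs
    · rw [if_pos (this.mpr hm), if_pos hm]
    · rw [if_neg (fun h => hm (this.mp h)), if_neg hm]

theorem pvFilter_ge_congr (c : Int) (t : List Int) (h : c ∉ t) :
    t.filter (fun z => decide (c ≤ z)) = t.filter (fun z => decide (c + 1 ≤ z)) := by
  apply List.filter_congr
  intro z hz
  have hne : z ≠ c := fun he => h (he ▸ hz)
  by_cases hle : c ≤ z
  · have : c + 1 ≤ z := by omega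
    simp [hle, this]
  · have : ¬ c + 1 ≤ z := by omega
    simp [hle, this]

theorem pvCount (c : Int) :
    ∀ (s : List Int), s.Nodup → c ∈ s →
      (s.filter (fun z => decide (c + 1 ≤ z))).length + 1 =
        (s.filter (fun z => decide (c ≤ z))).length := by
  intro s
  induction s with
  | nil => intro _ h; cases h
  | cons a t ih =>
    intro hnd hm
    have hat : a ∉ t := (List.nodup_cons.mp hnd).1
    have hndt : t.Nodup := (List.nodup_cons.mp hnd).2
    rcases List.mem_cons.mp hm with he | hmt
    · subst he
      rw [List.filter_cons_of_neg (by simp), List.filter_cons_of_pos (by simp),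
        pvFilter_ge_congr c t hat]
      simp
    · have hne : c ≠ a := fun he => hat (he ▸ hmt)
      have := ih hndt hmt
      by_cases hca : c ≤ a
      · have hca1 : c + 1 ≤ a := by omega
        rw [List.filter_cons_of_pos (by simpa using hca1),
          List.filter_cons_of_pos (by simpa using hca)]
        simp only [List.length_cons]
        omega
      · have hca1 : ¬ (c + 1 ≤ a) := by omega
        rw [List.filter_cons_of_neg (by simpa using hca1),
          List.filter_cons_of_neg (by simpa using hca)]
        omega

theorem pvRun_stable :
    ∀ (f g : Nat) (c : Int) (s : List Int), s.Nodup →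
      (s.filter (fun z => decide (c ≤ z))).length ≤ f →
      (s.filter (fun z => decide (c ≤ z))).length ≤ g →
      pvRun f c s = pvRun g c s := by
  intro f
  induction f with
  | zero =>
    intro g c s hnd hf _
    have hns : c ∉ s := by
      intro hm
      have : c ∈ s.filter (fun z => decide (c ≤ z)) := by
        simp [List.mem_filter, hm]
      have := List.length_pos_of_mem this
      omega
    rw [pvRun_of_not_mem _ _ _ hns, pvRun_of_not_mem _ _ _ hns]
  | succ f ih =>
    intro g c s hnd hf hg
    cases g with
    | zero =>
      have hns : c ∉ s := by
        intro hm
        have : c ∈ s.filter (fun z => decide (c ≤ z)) := by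
          simp [List.mem_filter, hm]
        have := List.length_pos_of_mem this
        omega
      rw [pvRun_of_not_mem _ _ _ hns, pvRun_of_not_mem _ _ _ hns]
    | succ g =>
      by_cases hc : c ∈ s
      · rw [pvRun_succ, pvRun_succ, if_pos hc, if_pos hc]
        have hcount := pvCount c s hnd hc
        exact congrArg (c :: ·) (ih g (c + 1) s hnd (by omega) (by omega))
      · rw [pvRun_of_not_mem _ _ _ hc, pvRun_of_not_mem _ _ _ hc]

theorem pvFilter_len_le (c : Int) (s : List Int) :
    (s.filter (fun z => decide (c ≤ z))).length ≤ s.length :=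
  List.length_filter_le _ _

theorem pvMain :
    ∀ (s : List Int), s.Pairwise (· < ·) →
      (s.filter (fun x => !(decide ((x - 1) ∈ s)))).map
          (fun x => pvRun (s.length + 1) x s) = pvChunkAll s := by
  intro s
  induction s with
  | nil => intro _; rfl
  | cons x xs ih =>
    intro hp
    obtain ⟨hlt, hpxs⟩ := List.pairwise_cons.mp hp
    have hndxs : xs.Nodup := hpxs.imp Int.ne_of_lt
    -- the head x always passes the filter: x - 1 is below every element
    have hx1 : ((x : Int) - 1) ∉ (x :: xs) := by
      intro h
      rcases List.mem_cons.mp h with h | h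
      · omega
      · exact absurd (hlt _ h) (by omega)
    have hfx : ((x :: xs).filter (fun z => !(decide ((z - 1) ∈ (x :: xs))))) =
        x :: (xs.filter (fun z => !(decide ((z - 1) ∈ (x :: xs))))) :=
      List.filter_cons_of_pos (by simpa using hx1)
    cases xs with
    | nil =>
      have h2 : pvRun 1 (x + 1) [x] = [] :=
        pvRun_of_not_mem _ _ _ (by simp)
      have h1 : pvRun ([x].length + 1) x [x] = [x] := by
        rw [show [x].length + 1 = 1 + 1 from rfl, pvRun_succ, if_pos (by simp), h2]
      rw [hfx]
      simp only [List.filter_nil, List.map_cons, List.map_nil, h1]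
      rfl
    | cons y ys =>
      have hltys : ∀ z ∈ ys, y < z := (List.pairwise_cons.mp hpxs).1
      have hyy : x < y := hlt y (by simp)
      have hQy : ((y : Int) - 1) ∉ y :: ys := by
        intro h
        rcases List.mem_cons.mp h with h | h
        · omega
        · exact absurd (hltys _ h) (by omega)
      have hQP : ∀ z ∈ ys,
          (!(decide ((z - 1) ∈ (x :: y :: ys)))) = (!(decide ((z - 1) ∈ (y :: ys)))) := by
        intro z hz
        have hyz := hltys z hz
        have hiff : ((z - 1) ∈ (x :: y :: ys)) ↔ ((z - 1) ∈ (y :: ys)) := by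
          constructor
          · intro h
            rcases List.mem_cons.mp h with h | h
            · omega
            · exact h
          · exact fun h => List.mem_cons_of_mem _ h
        simp [hiff]
      have hrun : ∀ z : Int, x < z →
          pvRun ((x :: y :: ys).length + 1) z (x :: y :: ys) =
            pvRun ((y :: ys).length + 1) z (y :: ys) := by
        intro z hz
        rw [pvRun_cons_gt x (y :: ys) _ z hz]
        have hb := pvFilter_len_le z (y :: ys)
        exact pvRun_stable _ _ z (y :: ys) hndxs
          (by simp only [List.length_cons] at hb ⊢; omega)
          (by simp only [List.length_cons] at hb ⊢; omega)
      obtain ⟨g, gs, hc⟩ := pvChunk_head y ys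
      have hih := ih hpxs
      have hfQ : ((y :: ys).filter (fun z => !(decide ((z - 1) ∈ (y :: ys))))) =
          y :: (ys.filter (fun z => !(decide ((z - 1) ∈ (y :: ys))))) :=
        List.filter_cons_of_pos (by simpa using hQy)
      rw [hfQ] at hih
      have hchAll : pvChunkAll (y :: ys) = (y :: g) :: gs := by
        simpa [pvChunkAll] using hc
      rw [hchAll, List.map_cons, List.cons.injEq] at hih
      obtain ⟨hhead, htail⟩ := hih
      have htail' :
          ((ys.filter (fun z => !(decide ((z - 1) ∈ (y :: ys))))).map
            (fun z => pvRun ((x :: y :: ys).length + 1) z (x :: y :: ys))) = gs := by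
        rw [← htail]
        apply List.map_congr_left
        intro z hz
        have hzy : z ∈ ys := List.mem_of_mem_filter hz
        exact hrun z (lt_trans hyy (hltys z hzy))
      have hfPys :
          (ys.filter (fun z => !(decide ((z - 1) ∈ (x :: y :: ys))))) =
          (ys.filter (fun z => !(decide ((z - 1) ∈ (y :: ys))))) :=
        List.filter_congr hQP
      by_cases hyx : y = x + 1
      · -- y continues x's group
        have hy1x : (y : Int) - 1 = x := by omega
        have hPy : ((y : Int) - 1) ∈ x :: y :: ys := by
          rw [hy1x]; exact List.mem_cons_self ..
        have hfPy : ((y :: ys).filter (fun z => !(decide ((z - 1) ∈ (x :: y :: ys))))) =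
            ys.filter (fun z => !(decide ((z - 1) ∈ (x :: y :: ys)))) :=
          List.filter_cons_of_neg (by simp [hy1x])
        have hheadfull :
            pvRun ((x :: y :: ys).length + 1) x (x :: y :: ys) = x :: y :: g := by
          rw [pvRun_succ, if_pos (List.mem_cons_self ..),
            show (x :: y :: ys).length = (y :: ys).length + 1 from rfl,
            pvRun_cons_gt x (y :: ys) _ (x + 1) (by omega),
            show x + 1 = y from hyx.symm, hhead]
        rw [hfx, hfPy, hfPys, List.map_cons, hheadfull, htail']
        simp only [pvChunkAll, pvChunk, hc]
        rw [if_pos hyx]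
      · -- y starts a new group
        have hPy1 : ¬ ((y : Int) - 1 = x) := by omega
        have hPy2 : ¬ ((y : Int) - 1 = y) := by omega
        have hPy3 : ((y : Int) - 1) ∉ ys := fun h => absurd (hltys _ h) (by omega)
        have hfPy : ((y :: ys).filter (fun z => !(decide ((z - 1) ∈ (x :: y :: ys))))) =
            y :: ys.filter (fun z => !(decide ((z - 1) ∈ (x :: y :: ys)))) :=
          List.filter_cons_of_pos (by simp [hPy1, hPy2, hPy3])
        have hx1not : (x + 1 : Int) ∉ y :: ys := by
          intro h
          rcases List.mem_cons.mp h with h | h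
          · omega
          · exact absurd (hltys _ h) (by omega)
        have hheadfull :
            pvRun ((x :: y :: ys).length + 1) x (x :: y :: ys) = [x] := by
          rw [pvRun_succ, if_pos (List.mem_cons_self ..),
            show (x :: y :: ys).length = (y :: ys).length + 1 from rfl,
            pvRun_cons_gt x (y :: ys) _ (x + 1) (by omega),
            pvRun_of_not_mem _ _ _ hx1not]
        have hyfull : pvRun ((x :: y :: ys).length + 1) y (x :: y :: ys) = y :: g := by
          rw [hrun y hyy, hhead]
        rw [hfx, hfPy, hfPys, List.map_cons, List.map_cons, hheadfull, hyfull, htail']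
        simp [pvChunkAll, pvChunk, hc, hyx]

-- l = the NAME column indices in dict order; its sorted form drives both ports
theorem pvAssemble (l : List Int) (hndl : l.Nodup) :
    (match PySem.List.sorted l (fun x => x) false with
      | [] => ([] : List (List Int))
      | c0 :: rest => rest.foldl pvStepA [[c0]]) =
    ((PySem.List.sorted (PySem.Set.ofList l) (fun x => x) false).filter
        (fun start => !(PySem.Set.contains (PySem.Set.ofList l) (start - 1)))).map
      (fun start => pvRun ((PySem.Set.ofList l).length + 1) start (PySem.Set.ofList l)) := by
  have hpl : (PySem.List.sorted (PySem.Set.ofList l) (fun x => x) false).Pairwise (· < ·) :=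
    PySem.List.sorted_ofList_pairwise_lt l
  have hofl : PySem.Set.ofList l = l := PySem.Set.ofList_eq_self_of_nodup l hndl
  rw [hofl] at hpl ⊢
  have hperm : (PySem.List.sorted l (fun x => x) false).Perm l := PySem.List.sorted_perm _ _ _
  have hmem : ∀ z : Int, z ∈ l ↔ z ∈ PySem.List.sorted l (fun x => x) false :=
    fun z => (hperm.mem_iff).symm
  have hA : (match PySem.List.sorted l (fun x => x) false with
      | [] => ([] : List (List Int))
      | c0 :: rest => rest.foldl pvStepA [[c0]]) =
      pvChunkAll (PySem.List.sorted l (fun x => x) false) := by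
    cases PySem.List.sorted l (fun x => x) false with
    | nil => rfl
    | cons c0 rest => exact pvA_eq_chunk c0 rest
  have hB : ((PySem.List.sorted l (fun x => x) false).filter
        (fun start => !(PySem.Set.contains l (start - 1)))).map
      (fun start => pvRun (l.length + 1) start l) =
      pvChunkAll (PySem.List.sorted l (fun x => x) false) := by
    rw [List.filter_congr (fun z _ => by
        rw [pvContains_eq, decide_eq_decide.mpr (hmem (z - 1))])]
    rw [List.map_congr_left (fun z _ => by
        rw [pvRun_congr_mem l _ hmem, ← hperm.length_eq])]
    exact pvMain _ hpl
  rw [hA, ← hB]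

-- ===== VERDICT (by name: the statement is the Claim_ definition above) =====
theorem find_name_groups_py_spec : Claim_equal_find_name_groups_py := by
  intro cm _
  unfold Spec_find_name_groups_py find_name_groups_py find_name_groups_py_alt
  have hk : ((PySem.Dict.ofList cm).items.map (·.1)).Nodup := by
    have := PySem.Dict.nodup_keys_ofList (ps := cm)
    simpa [PySem.Dict.keys] using this
  have hndl : (((PySem.Dict.ofList cm).items.filter (fun p => p.2 == "NAME")).map (·.1)).Nodup :=
    (List.Sublist.map _ List.filter_sublist).nodup hk
  exact pvAssemble _ hndl
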